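-- pv_equiv track=rewrite | github.com/SideLair/advent-of-code | day_6/day6_task2.py | sum_of_counts
-- ===== SOURCE A (Python) =====
-- def common_answers(answers):
--     char_count = {}
--     for letter in 'abcdefghijklmnopqrstuvwxyz':
--         ans_count = 0
--
--         for answer in answers:
--             if letter in answer:
--                 ans_count += 1
--             else:
--                 continue
--
--         if ans_count == len(answers):
--             if letter not in char_count:
--                 char_count[letter] = 1
--             else:
--                 char_count[letter] += 1
--     return len(char_count)
--
-- def sum_of_counts(results):
--     sum_counts = 0
--     group_results = []
--     for result in results:
--         if result == '':
--             sum_counts += common_answers(group_results)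
--             group_results = []
--         else:
--             group_results.append(result)
--
--     sum_counts += common_answers(group_results)
--     group_results = []
--
--     return sum_counts
-- ===== SOURCE B (Python) =====
-- def sum_of_counts(results):
--     total = 0
--     cur = set('abcdefghijklmnopqrstuvwxyz')
--     for result in results:
--         if result == '':
--             total += len(cur)
--             cur = set('abcdefghijklmnopqrstuvwxyz')
--         else:
--             cur &= set(result)
--     return total + len(cur)
-- ===== Notes on version B (the rewrite author's own statement) =====
-- stated objective: simpler
-- what changed: Replaces the per-group 26-letter counting dict and the explicit group list with a single running intersection set seeded from the alphabet and flushed on blank lines.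
import Mathlib
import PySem

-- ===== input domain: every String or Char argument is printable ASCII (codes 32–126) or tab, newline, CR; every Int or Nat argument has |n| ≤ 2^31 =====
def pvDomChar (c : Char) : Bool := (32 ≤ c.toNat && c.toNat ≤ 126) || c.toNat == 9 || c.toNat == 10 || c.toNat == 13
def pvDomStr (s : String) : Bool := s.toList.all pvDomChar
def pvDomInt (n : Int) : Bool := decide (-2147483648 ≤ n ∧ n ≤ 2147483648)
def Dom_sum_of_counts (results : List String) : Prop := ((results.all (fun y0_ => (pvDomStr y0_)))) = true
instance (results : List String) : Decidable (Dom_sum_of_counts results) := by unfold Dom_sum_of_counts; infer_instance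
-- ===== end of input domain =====

-- B replaces A's per-group 26-letter counting dict and explicit group list with one running
-- intersection set seeded from the alphabet (simpler, one accumulator).

-- ===== PORT A =====
def common_answers (answers : List String) : Int :=
  let char_count : PySem.Dict Char Int :=
    ("abcdefghijklmnopqrstuvwxyz".toList).foldl (fun char_count letter =>
      let ans_count : Int := answers.foldl (fun ans_count answer =>
        if letter ∈ answer.toList then ans_count + 1 else ans_count) 0
      if ans_count = (answers.length : Int) then
        if char_count.contains letter = false then char_count.insert letter 1
        else char_count.insert letter (char_count.getD letter 0 + 1)
      else char_count) PySem.Dict.empty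
  (char_count.size : Int)

def sum_of_counts (results : List String) : Int :=
  let st := results.foldl (fun (st : Int × List String) result =>
    if result = "" then (st.1 + common_answers st.2, [])
    else (st.1, st.2 ++ [result])) (0, [])
  st.1 + common_answers st.2

-- ===== PORT B =====
def sum_of_counts_alt (results : List String) : Int :=
  let st := results.foldl (fun (st : Int × PySem.Set Char) result =>
    if result = "" then (st.1 + PySem.Set.len st.2, PySem.Set.ofList "abcdefghijklmnopqrstuvwxyz".toList)
    else (st.1, PySem.Set.inter st.2 (PySem.Set.ofList result.toList)))
    (0, PySem.Set.ofList "abcdefghijklmnopqrstuvwxyz".toList)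
  st.1 + PySem.Set.len st.2

-- ===== PRECONDITION & SPEC =====
def Spec_sum_of_counts (results : List String) (out : Int) : Prop := out = sum_of_counts_alt results
instance (results : List String) (out : Int) : Decidable (Spec_sum_of_counts results out) := by unfold Spec_sum_of_counts; infer_instance

-- ===== CLAIM (what is proved, stated in full; the proofs are below) =====
def Claim_equal_sum_of_counts : Prop := ∀ (results : List String), Dom_sum_of_counts results → Spec_sum_of_counts results (sum_of_counts results)

-- ===== LEMMAS AND PROOFS =====

-- the predicate "every answer of the group contains c"
def allMem (gs : List String) (c : Char) : Bool := gs.all (fun a => decide (c ∈ a.toList))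

lemma dict_fold_size (gs : List String) : ∀ (ls : List Char), ls.Nodup → ∀ (d : PySem.Dict Char Int),
    (∀ c ∈ ls, d.contains c = false) →
    (ls.foldl (fun char_count letter =>
        if (gs.foldl (fun ans_count answer =>
              if letter ∈ answer.toList then ans_count + 1 else ans_count) 0) = (gs.length : Int) then
          if char_count.contains letter = false then char_count.insert letter 1
          else char_count.insert letter (char_count.getD letter 0 + 1)
        else char_count) d).size
      = d.size + (ls.filter (allMem gs)).length := by
  intro ls
  induction ls with
  | nil => intro _ d _; simp
  | cons c ls ih =>
    intro hnd d hfresh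
    have hc : d.contains c = false := hfresh c (by simp)
    have hcond : ((gs.foldl (fun ans_count answer =>
          if c ∈ answer.toList then ans_count + 1 else ans_count) 0) = (gs.length : Int))
        ↔ allMem gs c = true := by
      rw [PySem.List.foldl_ite_add_one, zero_add, Nat.cast_inj]
      simp [allMem, List.countP_eq_length, List.all_eq_true]
    have hfresh' : ∀ x ∈ ls, (d.insert c 1).contains x = false := by
      intro x hx
      rw [PySem.Dict.contains_insert]
      have hne : x ≠ c := fun h => (List.nodup_cons.mp hnd).1 (h ▸ hx)
      simp [hne, hfresh x (by simp [hx])]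
    have hsize : (d.insert c 1).size = d.size + 1 := by
      simp [PySem.Dict.insert, hc, PySem.Dict.size]
    by_cases hall : allMem gs c = true
    · simp only [List.foldl_cons, if_pos (hcond.mpr hall), hc, reduceIte]
      rw [ih (List.nodup_cons.mp hnd).2 (d.insert c 1) hfresh', hsize]
      simp [hall]
      omega
    · have hall' : allMem gs c = false := by simpa using hall
      simp only [List.foldl_cons, if_neg (fun h => hall (hcond.mp h))]
      rw [ih (List.nodup_cons.mp hnd).2 d (fun x hx => hfresh x (by simp [hx]))]
      simp [hall']

lemma common_eq (gs : List String) :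
    common_answers gs
      = ((("abcdefghijklmnopqrstuvwxyz".toList).filter (allMem gs)).length : Int) := by
  simp only [common_answers]
  rw [dict_fold_size gs _ (by decide) PySem.Dict.empty
    (by intro c _; simp [PySem.Dict.empty, PySem.Dict.contains])]
  simp [PySem.Dict.empty, PySem.Dict.size]

lemma alpha_filter_nil : ("abcdefghijklmnopqrstuvwxyz".toList).filter (allMem [])
    = PySem.Set.ofList "abcdefghijklmnopqrstuvwxyz".toList := by
  decide

lemma inter_filter (gs : List String) (r : String) :
    PySem.Set.inter (("abcdefghijklmnopqrstuvwxyz".toList).filter (allMem gs))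
        (PySem.Set.ofList r.toList)
      = ("abcdefghijklmnopqrstuvwxyz".toList).filter (allMem (gs ++ [r])) := by
  simp only [PySem.Set.inter, List.filter_filter]
  apply List.filter_congr
  intro c _
  have hmem : (PySem.Set.ofList r.toList).contains c = decide (c ∈ r.toList) := by
    simp [PySem.Set.contains_eq_listContains, PySem.Set.mem_ofList]
  simp [allMem, Bool.and_comm]

lemma main_inv : ∀ (results : List String) (s : Int) (gs : List String),
    (let st := results.foldl (fun (st : Int × List String) result =>
        if result = "" then (st.1 + common_answers st.2, [])
        else (st.1, st.2 ++ [result])) (s, gs)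
     st.1 + common_answers st.2)
    = (let st := results.foldl (fun (st : Int × PySem.Set Char) result =>
        if result = "" then (st.1 + PySem.Set.len st.2, PySem.Set.ofList "abcdefghijklmnopqrstuvwxyz".toList)
        else (st.1, PySem.Set.inter st.2 (PySem.Set.ofList result.toList)))
        (s, ("abcdefghijklmnopqrstuvwxyz".toList).filter (allMem gs))
       st.1 + PySem.Set.len st.2) := by
  intro results
  induction results with
  | nil =>
    intro s gs
    simp only [List.foldl_nil]
    rw [common_eq]
    simp [PySem.Set.len]
  | cons r rs ih =>
    intro s gs
    by_cases h : r = ""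
    · simp only [List.foldl_cons]
      rw [if_pos h, if_pos h]
      rw [ih (s + common_answers gs) []]
      rw [alpha_filter_nil, common_eq gs]
      simp [PySem.Set.len]
    · simp only [List.foldl_cons]
      rw [if_neg h, if_neg h]
      rw [ih s (gs ++ [r])]
      rw [inter_filter]

-- ===== VERDICT (by name: the statement is the Claim_ definition above) =====
theorem sum_of_counts_spec : Claim_equal_sum_of_counts := by
  intro results _
  show sum_of_counts results = sum_of_counts_alt results
  simp only [sum_of_counts, sum_of_counts_alt]
  have h := main_inv results 0 []
  rw [alpha_filter_nil] at h
  exact h
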